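-- pv_equiv track=rewrite | github.com/hqqaazz/ordered-Enchanting-Demo | ordering.py | merged_penalty_book
-- ===== SOURCE A (Python) =====
-- def merged_penalty_book(num):
--     if num == 0:
--         return 0
--     xp = 0
--     p_list = [0 for x in range(num)]
--     while len(p_list) != 1 :
--         new_list = []
--         for i in range(num//2):
--             xp += sum([2**x-1 for x in p_list[i*2:i*2+2]])
--             new_list.append(max(p_list[i*2:i*2+2])+1)
--         if num %2 != 0:
--             new_list.append(p_list[-1])
--         p_list = new_list[:]
--         num = len(p_list)
--
--     return xp
-- ===== SOURCE B (Python) =====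
-- def merged_penalty_book(num):
--     # The work list is always [v]*c (+ optionally one smaller value w at the end),
--     # so simulate rounds on that compact state: O(log num) instead of O(num).
--     if num <= 1:
--         return 0
--     xp = 0
--     v, c, tail = 0, num, None
--     while c + (0 if tail is None else 1) > 1:
--         pv = 2 ** v - 1
--         if c % 2 == 0:
--             xp += c * pv
--             c = c // 2
--         elif tail is None:
--             xp += (c - 1) * pv
--             c = (c - 1) // 2
--             tail = v
--         else:
--             xp += (c - 1) * pv + pv + (2 ** tail - 1)
--             c = (c + 1) // 2
--             tail = None
--         v += 1
--     return xp
-- ===== Notes on version B (the rewrite author's own statement) =====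
-- stated objective: faster
-- what changed: B replaces A's explicit O(num)-length penalty list rebuilt each round by a compact run-length state (value, count, optional smaller tail value) updated with parity arithmetic, adding each round's bulk contribution c*(2^v-1) at once, so the whole computation is O(log num) rounds of O(1) work instead of O(num) total list work.
import Mathlib
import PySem

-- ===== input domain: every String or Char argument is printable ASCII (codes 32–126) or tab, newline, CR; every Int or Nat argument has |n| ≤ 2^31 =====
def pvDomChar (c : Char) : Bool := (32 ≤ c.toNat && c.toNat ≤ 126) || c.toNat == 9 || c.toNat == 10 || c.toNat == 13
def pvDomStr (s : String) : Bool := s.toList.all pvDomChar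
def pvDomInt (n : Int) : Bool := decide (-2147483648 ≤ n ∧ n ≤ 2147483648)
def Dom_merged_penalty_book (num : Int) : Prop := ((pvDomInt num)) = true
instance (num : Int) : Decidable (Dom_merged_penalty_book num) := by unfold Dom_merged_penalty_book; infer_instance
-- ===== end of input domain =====

-- B replaces A's O(num) list simulation by an O(log num) run-length state (value, count, optional tail).

-- ===== PORT A =====
-- one iteration of A's while-loop: the for-loop over range(num//2) plus the odd-length append
def mpbA_round (xp : Int) (num : Int) (p : List Int) : Int × List Int :=
  let st := (PySem.List.pyRange 0 (PySem.Int.floordiv num 2) 1).foldl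
    (fun (acc : Int × List Int) i =>
      let pair := PySem.List.slice p (some (i * 2)) (some (i * 2 + 2))
      -- 2**x: exact for the nonnegative levels this program produces (levels start at 0 and only grow)
      (acc.1 + (pair.map (fun x => 2 ^ x.toNat - 1)).sum,
       acc.2 ++ [(PySem.List.max? pair (fun x => x)).getD 0 + 1]))
    (xp, [])
  if PySem.Int.mod num 2 ≠ 0 then
    -- p_list[-1]; the list is nonempty whenever this line runs under Pre_ (getD 0 is a totality guard)
    (st.1, st.2 ++ [(PySem.List.pyGet? p (-1)).getD 0])
  else st

-- the per-iteration append grows the accumulator's list by one element (used for termination)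
theorem foldl_snd_len {A B : Type} {F : Int × List B → A → Int × List B}
    (hF : ∀ st a, (F st a).2.length = st.2.length + 1) :
    ∀ (l : List A) (st : Int × List B),
      (List.foldl F st l).2.length = st.2.length + l.length := by
  intro l
  induction l with
  | nil => intro st; simp
  | cons a tl ih =>
    intro st
    rw [List.foldl_cons, ih (F st a), hF]
    simp only [List.length_cons]
    omega

-- length of one round's new list (cited by mpbA_loop's termination proof)
theorem mpbA_round_snd_len (xp num : Int) (p : List Int) :
    (mpbA_round xp num p).2.length =
      (PySem.Int.floordiv num 2).toNat + (if PySem.Int.mod num 2 ≠ 0 then 1 else 0) := by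
  unfold mpbA_round
  split
  · simp only [List.length_append, List.length_cons, List.length_nil]
    rw [foldl_snd_len (by intro st a; simp)]
    simp [PySem.List.length_pyRange_one]
  · rw [foldl_snd_len (by intro st a; simp)]
    simp [PySem.List.length_pyRange_one]

-- A's while-loop; on every iteration reached from num ≥ 1 Python's `num` equals len(p_list),
-- so the loop carries only p_list. The length-0 branch is a totality guard (Python raises or
-- diverges there, reached only for num < 0, excluded by Pre_).
def mpbA_loop (xp : Int) (p : List Int) : Int :=
  if p.length = 1 then xp
  else if p.length = 0 then xp
  else
    let r := mpbA_round xp (p.length : Int) p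
    mpbA_loop r.1 r.2
termination_by p.length
decreasing_by
  rename_i h1 h0
  have hl := mpbA_round_snd_len xp (p.length : Int) p
  rw [PySem.Int.floordiv_eq_ediv_of_pos (by norm_num), PySem.Int.mod_eq_emod_of_pos (by norm_num)] at hl
  simp only [hl]
  split <;> rename_i hpar <;> omega

def merged_penalty_book (num : Int) : Int :=
  if num = 0 then 0
  else mpbA_loop 0 (List.replicate num.toNat 0)   -- [0 for x in range(num)] (empty for num < 0)

-- ===== PORT B =====
def mpbB_loop (xp v c : Int) (tail : Option Int) : Int :=
  if 1 < c + (match tail with | none => 0 | some _ => 1) then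
    let pv : Int := 2 ^ v.toNat - 1   -- 2**v: exact, v ≥ 0 throughout
    if PySem.Int.mod c 2 = 0 then
      mpbB_loop (xp + c * pv) (v + 1) (PySem.Int.floordiv c 2) tail
    else
      match tail with
      | none   => mpbB_loop (xp + (c - 1) * pv) (v + 1) (PySem.Int.floordiv (c - 1) 2) (some v)
      | some w => mpbB_loop (xp + (c - 1) * pv + pv + (2 ^ w.toNat - 1)) (v + 1)
                    (PySem.Int.floordiv (c + 1) 2) none
  else xp
termination_by (2 * c + (match tail with | none => 0 | some _ => 1)).toNat
decreasing_by
  all_goals rename_i hgt _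
  all_goals rw [PySem.Int.floordiv_eq_ediv_of_pos (by norm_num)]
  all_goals try rcases tail with _ | w
  all_goals simp only [] at hgt ⊢
  all_goals omega

def merged_penalty_book_alt (num : Int) : Int :=
  if num ≤ 1 then 0 else mpbB_loop 0 0 num none

-- ===== PRECONDITION & SPEC =====
-- Pre_ excludes negative num, on which A raises IndexError (odd num) or loops forever (even num).
def Pre_merged_penalty_book (num : Int) : Prop := 0 ≤ num
instance (num : Int) : Decidable (Pre_merged_penalty_book num) := by
  unfold Pre_merged_penalty_book; infer_instance
def pvWitness_merged_penalty_book : Int := 5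

def Spec_merged_penalty_book (num : Int) (out : Int) : Prop := out = merged_penalty_book_alt num
instance (num : Int) (out : Int) : Decidable (Spec_merged_penalty_book num out) := by
  unfold Spec_merged_penalty_book; infer_instance

-- ===== CLAIM (what is proved, stated in full; the proofs are below) =====
def Claim_equal_merged_penalty_book : Prop := ∀ (num : Int), Dom_merged_penalty_book num →
  Pre_merged_penalty_book num → Spec_merged_penalty_book num (merged_penalty_book num)

-- ===== LEMMAS AND PROOFS =====
-- the compact state (value v repeated c times, then an optional strictly smaller tail value)
def mpbTail : Option Int → List Int
  | none => []
  | some w => [w]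

def mpbRepr (v c : Int) (t : Option Int) : List Int :=
  List.replicate c.toNat v ++ mpbTail t

-- A's inner for-loop, rephrased as structural two-at-a-time recursion
def chunkGo : List Int → Int × List Int → Int × List Int
  | a :: b :: rest, st =>
      chunkGo rest (st.1 + ((2 ^ a.toNat - 1) + (2 ^ b.toNat - 1)), st.2 ++ [max a b + 1])
  | _, st => st

theorem chunkGo_nil (st : Int × List Int) : chunkGo [] st = st := rfl

theorem chunkGo_pair (a b : Int) (s : List Int) (st : Int × List Int) :
    chunkGo (a :: b :: s) st =
      chunkGo s (st.1 + ((2 ^ a.toNat - 1) + (2 ^ b.toNat - 1)), st.2 ++ [max a b + 1]) := rfl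

theorem chunkGo_replicate (q : Nat) (v : Int) (s : List Int) :
    ∀ st : Int × List Int, chunkGo (List.replicate (2 * q) v ++ s) st =
      chunkGo s (st.1 + 2 * (q : Int) * (2 ^ v.toNat - 1), st.2 ++ List.replicate q (v + 1)) := by
  induction q with
  | zero => intro st; simp
  | succ q ih =>
    intro st
    rw [show 2 * (q + 1) = (2 * q) + 1 + 1 from by ring]
    rw [List.replicate_succ, List.replicate_succ, List.cons_append, List.cons_append,
      chunkGo_pair, ih]
    have h1 : st.1 + ((2 ^ v.toNat - 1) + (2 ^ v.toNat - 1)) + 2 * (q : Int) * (2 ^ v.toNat - 1)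
        = st.1 + 2 * ((q : Int) + 1) * (2 ^ v.toNat - 1) := by ring
    have h2 : st.2 ++ [max v v + 1] ++ List.replicate q (v + 1)
        = st.2 ++ List.replicate (q + 1) (v + 1) := by
      rw [max_self, List.append_assoc, List.replicate_succ, List.singleton_append]
    rw [h1, h2]
    push_cast
    ring_nf

theorem foldNat_eq_chunk (m : Nat) : ∀ (p : List Int) (st : Int × List Int), 2 * m ≤ p.length →
    (List.range m).foldl
      (fun (acc : Int × List Int) (k : Nat) =>
        (acc.1 + (((p.drop (2 * k)).take 2).map (fun x => 2 ^ x.toNat - 1)).sum,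
         acc.2 ++ [(PySem.List.max? ((p.drop (2 * k)).take 2) (fun x => x)).getD 0 + 1])) st
    = chunkGo (p.take (2 * m)) st := by
  induction m with
  | zero => intro p st _; simp [chunkGo_nil]
  | succ m ih =>
    intro p st h
    match p with
    | a :: b :: rest =>
      have hdrop : ∀ k : Nat, ((a :: b :: rest).drop (2 * (k + 1))) = rest.drop (2 * k) := by
        intro k
        rw [show 2 * (k + 1) = (2 * k) + 1 + 1 from by ring]
        rfl
      rw [List.range_succ_eq_map]
      rw [List.foldl_cons, List.foldl_map]
      have hfun : (fun (acc : Int × List Int) (k : Nat) =>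
          (acc.1 + ((((a :: b :: rest).drop (2 * (k + 1))).take 2).map (fun x => 2 ^ x.toNat - 1)).sum,
           acc.2 ++ [(PySem.List.max? (((a :: b :: rest).drop (2 * (k + 1))).take 2) (fun x => x)).getD 0 + 1]))
          = (fun (acc : Int × List Int) (k : Nat) =>
          (acc.1 + (((rest.drop (2 * k)).take 2).map (fun x => 2 ^ x.toNat - 1)).sum,
           acc.2 ++ [(PySem.List.max? ((rest.drop (2 * k)).take 2) (fun x => x)).getD 0 + 1])) := by
        funext acc k
        rw [hdrop]
      rw [hfun]
      have hlen : 2 * m ≤ rest.length := by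
        simp only [List.length_cons] at h
        omega
      have hfirst : (st.1 + ((((a :: b :: rest).drop (2 * 0)).take 2).map (fun x => 2 ^ x.toNat - 1)).sum,
          st.2 ++ [(PySem.List.max? (((a :: b :: rest).drop (2 * 0)).take 2) (fun x => x)).getD 0 + 1])
          = (st.1 + ((2 ^ a.toNat - 1) + (2 ^ b.toNat - 1)), st.2 ++ [max a b + 1]) := by
        have htk : ((a :: b :: rest).drop (2 * 0)).take 2 = [a, b] := by simp
        rw [htk, PySem.List.max?_id_cons]
        simp
      rw [hfirst, ih rest _ hlen]
      rw [show 2 * (m + 1) = (2 * m) + 1 + 1 from by ring]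
      rw [List.take_succ_cons, List.take_succ_cons, chunkGo_pair]
    | [] => simp at h
    | [a] => simp at h; omega

theorem pyfold_eq_foldNat (m : Nat) (p : List Int) (st : Int × List Int) :
    (PySem.List.pyRange 0 (m : Int) 1).foldl
      (fun (acc : Int × List Int) (i : Int) =>
        (acc.1 + ((PySem.List.slice p (some (i * 2)) (some (i * 2 + 2))).map (fun x => 2 ^ x.toNat - 1)).sum,
         acc.2 ++ [(PySem.List.max? (PySem.List.slice p (some (i * 2)) (some (i * 2 + 2))) (fun x => x)).getD 0 + 1])) st
    = (List.range m).foldl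
      (fun (acc : Int × List Int) (k : Nat) =>
        (acc.1 + (((p.drop (2 * k)).take 2).map (fun x => 2 ^ x.toNat - 1)).sum,
         acc.2 ++ [(PySem.List.max? ((p.drop (2 * k)).take 2) (fun x => x)).getD 0 + 1])) st := by
  rw [PySem.List.pyRange_one]
  simp only [sub_zero, Int.toNat_natCast, zero_add]
  rw [List.foldl_map]
  have hsl : ∀ k : Nat, PySem.List.slice p (some ((k : Int) * 2)) (some ((k : Int) * 2 + 2))
      = (p.drop (2 * k)).take 2 := by
    intro k
    rw [show ((k : Int) * 2) = ((2 * k : Nat) : Int) from by push_cast; ring,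
        show (((2 * k : Nat) : Int) + 2) = ((2 * k + 2 : Nat) : Int) from by push_cast; ring,
        PySem.List.slice_natCast]
    congr 1
    omega
  simp only [hsl]

-- loop-level B step lemmas (resolve mpbB_loop's control flow once)
theorem B_done (xp v c : Int) (t : Option Int)
    (h : ¬ 1 < c + (match t with | none => 0 | some _ => 1)) :
    mpbB_loop xp v c t = xp := by
  conv_lhs => rw [mpbB_loop.eq_def]
  rw [if_neg h]

theorem B_step_even (xp v c : Int) (t : Option Int)
    (h1 : 1 < c + (match t with | none => 0 | some _ => 1))
    (h2 : PySem.Int.mod c 2 = 0) :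
    mpbB_loop xp v c t = mpbB_loop (xp + c * (2 ^ v.toNat - 1)) (v + 1) (PySem.Int.floordiv c 2) t := by
  conv_lhs => rw [mpbB_loop.eq_def]
  rw [if_pos h1, if_pos h2]

theorem B_step_odd_none (xp v c : Int)
    (h1 : 1 < c) (h2 : PySem.Int.mod c 2 ≠ 0) :
    mpbB_loop xp v c none
      = mpbB_loop (xp + (c - 1) * (2 ^ v.toNat - 1)) (v + 1) (PySem.Int.floordiv (c - 1) 2) (some v) := by
  conv_lhs => rw [mpbB_loop.eq_def]
  rw [if_pos (show (1 : Int) < c + (match (none : Option Int) with | none => 0 | some _ => 1)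
        from by simpa using h1)]
  rw [if_neg h2]

theorem B_step_odd_some (xp v c w : Int)
    (h1 : 1 < c + 1) (h2 : PySem.Int.mod c 2 ≠ 0) :
    mpbB_loop xp v c (some w)
      = mpbB_loop (xp + (c - 1) * (2 ^ v.toNat - 1) + (2 ^ v.toNat - 1) + (2 ^ w.toNat - 1)) (v + 1)
          (PySem.Int.floordiv (c + 1) 2) none := by
  conv_lhs => rw [mpbB_loop.eq_def]
  rw [if_pos (show (1 : Int) < c + (match (some w : Option Int) with | none => 0 | some _ => 1)
        from by simpa using h1)]
  rw [if_neg h2]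

-- loop-level A step lemmas
theorem A_done (xp : Int) (p : List Int) (h : p.length = 1) : mpbA_loop xp p = xp := by
  rw [mpbA_loop, if_pos h]

theorem A_step (xp : Int) (p : List Int) (h1 : p.length ≠ 1) (h0 : p.length ≠ 0) :
    mpbA_loop xp p = mpbA_loop (mpbA_round xp (p.length : Int) p).1 (mpbA_round xp (p.length : Int) p).2 := by
  rw [mpbA_loop, if_neg h1, if_neg h0]

-- evaluating one round of A on the compact shapes (per parity case)
theorem fd_natCast (n : Nat) : PySem.Int.floordiv ((n : Nat) : Int) 2 = ((n / 2 : Nat) : Int) := by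
  rw [PySem.Int.floordiv_eq_ediv_of_pos (by norm_num)]
  omega

theorem md_natCast (n : Nat) : PySem.Int.mod ((n : Nat) : Int) 2 = ((n % 2 : Nat) : Int) := by
  rw [PySem.Int.mod_eq_emod_of_pos (by norm_num)]
  omega

theorem roundA_none (xp v : Int) (k : Nat) (hk : 1 ≤ k) :
    mpbA_round xp ((k : Nat) : Int) (List.replicate k v)
      = (xp + 2 * ((k / 2 : Nat) : Int) * (2 ^ v.toNat - 1),
         List.replicate (k / 2) (v + 1) ++ (if k % 2 ≠ 0 then [v] else [])) := by
  unfold mpbA_round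
  rw [fd_natCast, md_natCast]
  rw [pyfold_eq_foldNat (k / 2), foldNat_eq_chunk (k / 2) _ _ (by simp; omega)]
  rw [List.take_replicate, show min (2 * (k / 2)) k = 2 * (k / 2) from by omega]
  have hch := chunkGo_replicate (k / 2) v [] (xp, [])
  rw [List.append_nil] at hch
  rw [hch, chunkGo_nil]
  have hlast : (PySem.List.pyGet? (List.replicate k v) (-1)).getD 0 = v := by
    have hrep : List.replicate k v = List.replicate (k - 1) v ++ [v] := by
      conv_lhs => rw [show k = (k - 1) + 1 from by omega]
      rw [List.replicate_succ']
    rw [hrep, PySem.List.pyGet?_neg_one_append_singleton]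
    rfl
  by_cases hpar : k % 2 = 0
  · rw [hpar]
    simp
  · rw [show k % 2 = 1 from by omega]
    simp [hlast]

theorem roundA_some_even (xp v w : Int) (k : Nat) (hpar : k % 2 = 0) :
    mpbA_round xp ((k + 1 : Nat) : Int) (List.replicate k v ++ [w])
      = (xp + ((k : Nat) : Int) * (2 ^ v.toNat - 1), List.replicate (k / 2) (v + 1) ++ [w]) := by
  unfold mpbA_round
  rw [fd_natCast, md_natCast]
  rw [pyfold_eq_foldNat ((k + 1) / 2),
      foldNat_eq_chunk ((k + 1) / 2) _ _ (by simp; omega)]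
  rw [show 2 * ((k + 1) / 2) = k from by omega]
  rw [List.take_left' (by simp)]
  rw [show (List.replicate k v) = List.replicate (2 * (k / 2)) v from by
        rw [show 2 * (k / 2) = k from by omega]]
  have hch := chunkGo_replicate (k / 2) v [] (xp, [])
  rw [List.append_nil] at hch
  rw [hch, chunkGo_nil]
  have hget : (PySem.List.pyGet? (List.replicate (2 * (k / 2)) v ++ [w]) (-1)).getD 0 = w := by
    rw [PySem.List.pyGet?_neg_one_append_singleton]
    rfl
  rw [show (k + 1) % 2 = 1 from by omega]
  rw [show 2 * ((k / 2 : Nat) : Int) = ((k : Nat) : Int) from by omega]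
  simp [hget]

theorem roundA_some_odd (xp v w : Int) (k : Nat) (hpar : k % 2 = 1) (hw : w ≤ v) :
    mpbA_round xp ((k + 1 : Nat) : Int) (List.replicate k v ++ [w])
      = (xp + (((k : Nat) : Int) - 1) * (2 ^ v.toNat - 1) + (2 ^ v.toNat - 1) + (2 ^ w.toNat - 1),
         List.replicate ((k + 1) / 2) (v + 1)) := by
  unfold mpbA_round
  rw [fd_natCast, md_natCast]
  rw [pyfold_eq_foldNat ((k + 1) / 2),
      foldNat_eq_chunk ((k + 1) / 2) _ _ (by simp; omega)]
  rw [List.take_of_length_le (by simp; omega)]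
  have hsplit : List.replicate k v ++ [w] = List.replicate (2 * ((k - 1) / 2)) v ++ [v, w] := by
    conv_lhs => rw [show k = 2 * ((k - 1) / 2) + 1 from by omega, List.replicate_succ']
    simp
  rw [hsplit, chunkGo_replicate ((k - 1) / 2) v [v, w] (xp, [])]
  rw [chunkGo_pair, chunkGo_nil]
  rw [show (k + 1) % 2 = 0 from by omega]
  simp only [List.nil_append, Nat.cast_zero, ne_eq, not_true_eq_false, if_false,
    not_false_eq_true]
  rw [max_eq_left hw]
  rw [show List.replicate ((k - 1) / 2) (v + 1) ++ [v + 1] = List.replicate ((k - 1) / 2 + 1) (v + 1)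
        from by rw [List.replicate_succ']]
  rw [show (k - 1) / 2 + 1 = (k + 1) / 2 from by omega]
  rw [show 2 * (((k - 1) / 2 : Nat) : Int) = ((k : Nat) : Int) - 1 from by omega]
  ring_nf

-- the loop invariant: A on the expanded list equals B on the compact state
theorem loop_eq (M : Nat) : ∀ (xp v c : Int) (t : Option Int),
    (2 * c + (match t with | none => 0 | some _ => 1)).toNat ≤ M →
    1 ≤ c → 0 ≤ v → (∀ w, t = some w → 0 ≤ w ∧ w < v) →
    mpbA_loop xp (mpbRepr v c t) = mpbB_loop xp v c t := by
  induction M using Nat.strong_induction_on with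
  | _ M IH =>
  intro xp v c t hM hc hv ht
  obtain ⟨k, rfl⟩ : ∃ k : Nat, c = (k : Int) := ⟨c.toNat, by omega⟩
  have hk1 : 1 ≤ k := by exact_mod_cast hc
  rcases t with _ | w
  · have hM' : 2 * k ≤ M := by
      have h2 : ((2 * (k : Int) + 0)).toNat ≤ M := hM
      omega
    have hrepr : mpbRepr v (↑k) none = List.replicate k v := by simp only [mpbRepr, mpbTail, Int.toNat_natCast, List.append_nil]
    by_cases hk2 : k = 1
    · subst hk2
      rw [hrepr, A_done _ _ (by simp), B_done _ _ _ _ (by norm_num)]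
    · have hk2' : 2 ≤ k := by omega
      rw [hrepr, A_step _ _ (by simp [hk2]) (by simp; omega)]
      simp only [List.length_replicate]
      rw [roundA_none xp v k hk1]
      have hrepr2 : mpbRepr (v + 1) ((k / 2 : Nat) : Int) none = List.replicate (k / 2) (v + 1) := by
        simp only [mpbRepr, mpbTail, Int.toNat_natCast, List.append_nil]
      by_cases hpar : k % 2 = 0
      · rw [if_neg (by omega), List.append_nil]
        rw [B_step_even _ _ _ none (by omega : (1 : Int) < (k : Int) + 0)
              (by rw [md_natCast, hpar]; simp)]
        rw [fd_natCast]
        rw [show ((k : Nat) : Int) * (2 ^ v.toNat - 1) = 2 * ((k / 2 : Nat) : Int) * (2 ^ v.toNat - 1)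
              from by rw [show ((k : Nat) : Int) = 2 * ((k / 2 : Nat) : Int) from by omega]]
        rw [← hrepr2]
        exact IH (2 * (k / 2)) (by omega) _ _ _ _ (by simp) (by omega) (by omega)
          (by intro u h; cases h)
      · rw [if_pos (by omega)]
        rw [B_step_odd_none _ _ _ (by omega : (1 : Int) < (k : Int))
              (by rw [md_natCast]; omega)]
        rw [show PySem.Int.floordiv ((k : Int) - 1) 2 = ((k / 2 : Nat) : Int) from by
              rw [PySem.Int.floordiv_eq_ediv_of_pos (by norm_num)]; omega]
        rw [show ((k : Int) - 1) * (2 ^ v.toNat - 1) = 2 * ((k / 2 : Nat) : Int) * (2 ^ v.toNat - 1)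
              from by rw [show ((k : Int) - 1) = 2 * ((k / 2 : Nat) : Int) from by omega]]
        have hrepr3 : mpbRepr (v + 1) ((k / 2 : Nat) : Int) (some v)
            = List.replicate (k / 2) (v + 1) ++ [v] := by simp only [mpbRepr, mpbTail, Int.toNat_natCast, List.append_nil]
        rw [← hrepr3]
        exact IH (2 * (k / 2) + 1) (by omega) _ _ _ _ (by simp) (by omega) (by omega)
          (by intro u h; cases h; exact ⟨hv, by omega⟩)
  · obtain ⟨hw0, hwv⟩ := ht w rfl
    have hM' : 2 * k + 1 ≤ M := by
      have h2 : ((2 * (k : Int) + 1)).toNat ≤ M := hM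
      omega
    have hrepr : mpbRepr v (↑k) (some w) = List.replicate k v ++ [w] := by simp only [mpbRepr, mpbTail, Int.toNat_natCast, List.append_nil]
    rw [hrepr, A_step _ _ (by simp; omega) (by simp)]
    simp only [List.length_append, List.length_replicate, List.length_singleton]
    by_cases hpar : k % 2 = 0
    · have hk2' : 2 ≤ k := by omega
      rw [roundA_some_even xp v w k hpar]
      rw [B_step_even _ _ _ (some w) (by omega : (1 : Int) < (k : Int) + 1)
            (by rw [md_natCast, hpar]; simp)]
      rw [fd_natCast]
      have hrepr2 : mpbRepr (v + 1) ((k / 2 : Nat) : Int) (some w)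
          = List.replicate (k / 2) (v + 1) ++ [w] := by simp only [mpbRepr, mpbTail, Int.toNat_natCast, List.append_nil]
      rw [← hrepr2]
      exact IH (2 * (k / 2) + 1) (by omega) _ _ _ _ (by simp) (by omega) (by omega)
        (by intro u h; cases h; exact ⟨hw0, by omega⟩)
    · rw [roundA_some_odd xp v w k (by omega) (le_of_lt hwv)]
      rw [B_step_odd_some _ _ _ _ (by omega : (1 : Int) < (k : Int) + 1)
            (by rw [md_natCast]; omega)]
      rw [show PySem.Int.floordiv ((k : Int) + 1) 2 = (((k + 1) / 2 : Nat) : Int) from by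
            rw [PySem.Int.floordiv_eq_ediv_of_pos (by norm_num)]; omega]
      have hrepr2 : mpbRepr (v + 1) (((k + 1) / 2 : Nat) : Int) none
          = List.replicate ((k + 1) / 2) (v + 1) := by simp only [mpbRepr, mpbTail, Int.toNat_natCast, List.append_nil]
      rw [← hrepr2]
      exact IH (2 * ((k + 1) / 2)) (by omega) _ _ _ _ (by simp) (by omega) (by omega)
        (by intro u h; cases h)

-- ===== VERDICT (by name: the statement is the Claim_ definition above) =====
theorem merged_penalty_book_spec : Claim_equal_merged_penalty_book := by
  unfold Claim_equal_merged_penalty_book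
  intro num _ hpre
  unfold Pre_merged_penalty_book at hpre
  unfold Spec_merged_penalty_book merged_penalty_book merged_penalty_book_alt
  obtain ⟨n, rfl⟩ : ∃ n : Nat, num = (n : Int) := ⟨num.toNat, by omega⟩
  by_cases h0 : n = 0
  · subst h0
    norm_num
  by_cases h1 : n = 1
  · subst h1
    rw [if_neg (by norm_num), if_pos (by norm_num)]
    rw [show ((1 : Nat) : Int).toNat = 1 from rfl]
    exact A_done _ _ (by simp)
  obtain ⟨m, rfl⟩ : ∃ m : Nat, n = m + 2 := ⟨n - 2, by omega⟩
  rw [if_neg (by omega : ¬ (((m + 2 : Nat) : Int) = 0)),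
      if_neg (by omega : ¬ (((m + 2 : Nat) : Int) ≤ 1))]
  rw [show ((m + 2 : Nat) : Int).toNat = m + 2 from by omega]
  rw [show List.replicate (m + 2) (0 : Int) = mpbRepr 0 ((m + 2 : Nat) : Int) none from by
        simp only [mpbRepr, mpbTail, Int.toNat_natCast, List.append_nil]]
  exact loop_eq (2 * (m + 2)) 0 0 ((m + 2 : Nat) : Int) none (by simp) (by omega)
    (le_refl 0) (by intro w h; cases h)
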